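-- pv_equiv track=rewrite | github.com/pypi-data/pypi-mirror-48 | packages/makekml3/makekml3-0.2.1.tar.gz/makekml3-0.2.1/makekml3/__init__.py | kmlclean
-- ===== SOURCE A (Python) =====
-- BADDIES = {'&':'&amp;'}
--
-- def kmlclean(string):
--     if string == None:
--         return 'NA'
--     newstring = ''
--     for i in range(0,len(string)):
--         c = string[i]
--         if c not in BADDIES:
--             newstring+=c
--             continue
--         if c not in BADDIES[c]:
--             newstring+=BADDIES[c]
--             continue
--         j = BADDIES[c].index(c)
--         if string[i-j:i-j+len(BADDIES[c])] == BADDIES[c]: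
--             newstring+=c
--             continue
--         newstring += BADDIES[c]
--     return newstring
-- ===== SOURCE B (Python) =====
-- def kmlclean(string):
--     if string == None:
--         return 'NA'
--     return '&amp;'.join(part.replace('&', '&amp;') for part in string.split('&amp;'))
-- ===== Notes on version B (the rewrite author's own statement) =====
-- stated objective: idiomatic
-- what changed: Replaces the per-character index loop with dict lookup, membership tests and a back-slice comparison by the standard idiom: split the string on the already-escaped entity, escape every remaining ampersand with str.replace, and rejoin.
import Mathlib
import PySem

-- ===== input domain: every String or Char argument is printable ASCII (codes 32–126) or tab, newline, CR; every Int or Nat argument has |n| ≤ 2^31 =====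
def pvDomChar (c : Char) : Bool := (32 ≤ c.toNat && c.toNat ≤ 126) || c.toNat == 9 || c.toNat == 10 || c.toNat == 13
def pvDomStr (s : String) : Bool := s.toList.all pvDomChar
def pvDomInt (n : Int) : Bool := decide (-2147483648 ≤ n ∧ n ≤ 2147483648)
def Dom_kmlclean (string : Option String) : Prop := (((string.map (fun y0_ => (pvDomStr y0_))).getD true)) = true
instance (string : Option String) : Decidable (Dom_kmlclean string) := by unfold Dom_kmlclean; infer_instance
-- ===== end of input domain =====

-- B escapes '&' to '&amp;' without double-encoding via the idiomatic split/replace/join instead of A's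
-- index loop with dict lookup and back-slice comparison; same behaviour, no speed claim.

-- ===== PORT A =====
def BADDIES : PySem.Dict Char (List Char) := PySem.Dict.mk [('&', ['&', 'a', 'm', 'p', ';'])]

-- the body of A's 'for i in range(0, len(string))' loop, appending to newstring (= acc)
def kmlcleanStep (cs : List Char) (acc : List Char) (i : Int) : List Char :=
  let c := PySem.List.pyGetD cs i ' '
  if !(BADDIES.contains c) then acc ++ [c]
  else
    let b := (BADDIES.get? c).getD []
    if !(b.contains c) then acc ++ b
    else
      let j : Int := ((PySem.List.index? b c).getD 0 : Nat)
      if PySem.List.slice cs (some (i - j)) (some (i - j + (b.length : Int))) = b then acc ++ [c]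
      else acc ++ b

def kmlclean (string : Option String) : String :=
  match string with
  | none => "NA"
  | some s =>
    let cs := s.toList
    String.ofList ((PySem.List.pyRange 0 (cs.length : Int) 1).foldl (kmlcleanStep cs) [])

-- ===== PORT B =====
def kmlclean_alt (string : Option String) : String :=
  match string with
  | none => "NA"
  | some s =>
    String.ofList (PySem.Chars.join "&amp;".toList
      ((PySem.Chars.splitOn s.toList "&amp;".toList).map
        (fun part => PySem.Chars.replace part "&".toList "&amp;".toList)))

-- ===== PRECONDITION & SPEC =====
def Spec_kmlclean (string : Option String) (out : String) : Prop := out = kmlclean_alt string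
instance (string : Option String) (out : String) : Decidable (Spec_kmlclean string out) := by unfold Spec_kmlclean; infer_instance

-- ===== CLAIM (what is proved, stated in full; the proofs are below) =====
def Claim_equal_kmlclean : Prop := ∀ (string : Option String), Dom_kmlclean string → Spec_kmlclean string (kmlclean string)

-- ===== LEMMAS AND PROOFS =====

-- '&amp;' as a char list
def ampL : List Char := ['&', 'a', 'm', 'p', ';']

-- the common one-char-at-a-time specification both programs satisfy
def fRec : List Char → List Char
  | [] => []
  | c :: rest =>
      (if c == '&' && !(List.isPrefixOf ['a', 'm', 'p', ';'] rest) then ampL else [c]) ++ fRec rest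

-- clean recursion computed by PySem.Chars.replace part ['&'] ampL
def repA : List Char → List Char
  | [] => []
  | c :: t => (if c == '&' then ampL else [c]) ++ repA t

-- clean recursion computed by PySem.Chars.splitOn l ampL
def splA : List Char → List (List Char)
  | [] => [[]]
  | c :: rest =>
      if ampL.isPrefixOf (c :: rest) then [] :: splA ((c :: rest).drop 5)
      else (splA rest).modifyHead (c :: ·)
  termination_by l => l.length
  decreasing_by all_goals (simp; try omega)

lemma repA_go (fuel : Nat) : ∀ (l acc : List Char), l.length ≤ fuel →
    PySem.Chars.replace.go ['&'] ampL fuel l acc = acc.reverse ++ repA l := by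
  induction fuel with
  | zero =>
    intro l acc h
    have hl : l = [] := by cases l <;> simp_all
    subst hl
    simp [PySem.Chars.replace.go, repA]
  | succ f ih =>
    intro l acc h
    cases l with
    | nil => simp [PySem.Chars.replace.go, repA]
    | cons c t =>
      have ht : t.length ≤ f := by simp at h; omega
      by_cases hc : c = '&'
      · subst hc
        rw [show PySem.Chars.replace.go ['&'] ampL (f + 1) ('&' :: t) acc
              = PySem.Chars.replace.go ['&'] ampL f t (ampL.reverse ++ acc) from by
            simp only [PySem.Chars.replace.go]
            rw [if_pos (by simp [List.isPrefixOf])]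
            rfl]
        rw [ih t _ ht]
        simp [repA]
      · have hcc : (('&' : Char) == c) = false := beq_eq_false_iff_ne.mpr (Ne.symm hc)
        rw [show PySem.Chars.replace.go ['&'] ampL (f + 1) (c :: t) acc
              = PySem.Chars.replace.go ['&'] ampL f t (c :: acc) from by
            simp only [PySem.Chars.replace.go]
            rw [if_neg (by simp [List.isPrefixOf, hcc])]]
        rw [ih t _ ht]
        simp [repA, hc]

lemma replace_eq (l : List Char) : PySem.Chars.replace l ['&'] ampL = repA l := by
  have h := repA_go l.length l [] le_rfl
  simpa [PySem.Chars.replace] using h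

lemma splA_ne_nil (l : List Char) : splA l ≠ [] := by
  fun_induction splA l with
  | case1 => simp
  | case2 c rest hp ih => simp
  | case3 c rest hp ih =>
    cases hsr : splA rest with
    | nil => exact absurd hsr ih
    | cons p ps => simp

lemma splA_cons (l : List Char) : ∃ p ps, splA l = p :: ps := by
  cases hsr : splA l with
  | nil => exact absurd hsr (splA_ne_nil l)
  | cons p ps => exact ⟨p, ps, rfl⟩

lemma splA_go (fuel : Nat) : ∀ (l cur : List Char) (acc : List (List Char)), l.length ≤ fuel →
    PySem.Chars.splitOn.go ampL fuel l cur acc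
      = acc.reverse ++ (splA l).modifyHead (cur.reverse ++ ·) := by
  induction fuel with
  | zero =>
    intro l cur acc h
    have hl : l = [] := by cases l <;> simp_all
    subst hl
    simp [PySem.Chars.splitOn.go, splA]
  | succ f ih =>
    intro l cur acc h
    cases l with
    | nil => simp [PySem.Chars.splitOn.go, splA]
    | cons c rest =>
      by_cases hp : ampL.isPrefixOf (c :: rest)
      · rw [show PySem.Chars.splitOn.go ampL (f + 1) (c :: rest) cur acc
              = PySem.Chars.splitOn.go ampL f ((c :: rest).drop 5) [] (cur.reverse :: acc) from by
            simp only [PySem.Chars.splitOn.go]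
            rw [if_pos hp]
            rfl]
        rw [ih _ _ _ (by simp at h ⊢; omega)]
        rw [show splA (c :: rest) = [] :: splA ((c :: rest).drop 5) from by rw [splA]; simp [hp]]
        obtain ⟨p, ps, hps⟩ := splA_cons ((c :: rest).drop 5)
        rw [hps]
        simp
      · rw [show PySem.Chars.splitOn.go ampL (f + 1) (c :: rest) cur acc
              = PySem.Chars.splitOn.go ampL f rest (c :: cur) acc from by
            simp only [PySem.Chars.splitOn.go]
            rw [if_neg hp]]
        rw [ih _ _ _ (by simp at h; omega)]
        rw [show splA (c :: rest) = (splA rest).modifyHead (c :: ·) from by rw [splA]; simp [hp]]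
        obtain ⟨p, ps, hps⟩ := splA_cons rest
        rw [hps]
        simp

lemma splitOn_eq (l : List Char) : PySem.Chars.splitOn l ampL = splA l := by
  simp only [PySem.Chars.splitOn]
  rw [splA_go (l.length + 1) l [] [] (by omega)]
  obtain ⟨p, ps, hps⟩ := splA_cons l
  simp [hps]

lemma join_head_append (x p : List Char) (qs : List (List Char)) :
    PySem.Chars.join ampL ((x ++ p) :: qs) = x ++ PySem.Chars.join ampL (p :: qs) := by
  cases qs with
  | nil => simp [PySem.Chars.join_singleton]
  | cons q qs => simp [PySem.Chars.join_cons_cons]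

lemma fRec_amp (t : List Char) : fRec (ampL ++ t) = ampL ++ fRec t := by
  simp [ampL, fRec, List.isPrefixOf,
    show (('a' : Char) == '&') = false from rfl, show (('m' : Char) == '&') = false from rfl,
    show (('p' : Char) == '&') = false from rfl, show ((';' : Char) == '&') = false from rfl]

lemma B_eq (l : List Char) :
    PySem.Chars.join ampL ((splA l).map repA) = fRec l := by
  fun_induction splA l with
  | case1 => simp [repA, PySem.Chars.join_singleton, fRec]
  | case2 c rest hp ih =>
    obtain ⟨p, ps, hps⟩ := splA_cons ((c :: rest).drop 5)
    rw [hps] at ih ⊢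
    simp only [List.map_cons]
    rw [show repA [] = [] from rfl, PySem.Chars.join_cons_cons]
    rw [show PySem.Chars.join ampL (repA p :: List.map repA ps)
          = PySem.Chars.join ampL (List.map repA (p :: ps)) from by simp]
    rw [ih]
    obtain ⟨t, ht⟩ : ∃ t, ampL ++ t = c :: rest := (List.isPrefixOf_iff_prefix).mp hp
    have hd : (c :: rest).drop 5 = t := by rw [← ht]; simp [ampL]
    rw [hd, ← ht, fRec_amp]
    simp
  | case3 c rest hp ih =>
    obtain ⟨p, ps, hps⟩ := splA_cons rest
    rw [hps] at ih ⊢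
    simp only [List.modifyHead_cons, List.map_cons]
    rw [show repA (c :: p) = (if c == '&' then ampL else [c]) ++ repA p from by rw [repA]]
    rw [join_head_append]
    rw [show PySem.Chars.join ampL (repA p :: List.map repA ps)
          = PySem.Chars.join ampL (List.map repA (p :: ps)) from by simp]
    rw [ih]
    rw [show fRec (c :: rest)
          = (if c == '&' && !(List.isPrefixOf ['a', 'm', 'p', ';'] rest) then ampL else [c])
              ++ fRec rest from by rw [fRec]]
    congr 1
    by_cases hc : c = '&'
    · subst hc
      have hnp : List.isPrefixOf ['a', 'm', 'p', ';'] rest = false := by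
        by_contra hx
        apply hp
        simp at hx
        simp [ampL, hx]
      simp [hnp]
    · simp [hc]

lemma step_eq (cs acc : List Char) (k : Nat) (h : k < cs.length) :
    kmlcleanStep cs acc (k : Int)
      = acc ++ (if cs[k] == '&' && !(List.isPrefixOf ['a', 'm', 'p', ';'] (cs.drop (k + 1)))
                then ampL else [cs[k]]) := by
  simp only [kmlcleanStep, PySem.List.pyGetD_natCast]
  rw [show cs.getD k ' ' = cs[k] from by simp [List.getD, List.getElem?_eq_getElem h]]
  by_cases hc : cs[k] = '&'
  · rw [hc]
    rw [show BADDIES.contains '&' = true from by decide]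
    rw [show BADDIES.get? '&' = some ['&', 'a', 'm', 'p', ';'] from by decide]
    simp only [Option.getD_some, Bool.not_true, Bool.false_eq_true, if_false]
    rw [show (['&', 'a', 'm', 'p', ';'].contains '&') = true from by decide]
    rw [show PySem.List.index? ['&', 'a', 'm', 'p', ';'] '&' = some (0 : Nat) from by decide]
    simp only [Option.getD_some, Nat.cast_zero, sub_zero]
    have hsl : PySem.List.slice cs (some (k : Int))
        (some ((k : Int) + ((['&', 'a', 'm', 'p', ';'] : List Char).length : Int)))
        = List.take 5 (List.drop k cs) := by
      rw [show ((((['&', 'a', 'm', 'p', ';'] : List Char).length : Nat)) : Int) = ((5 : Nat) : Int) from by norm_num]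
      exact PySem.List.slice_natCast_add cs k 5
    rw [hsl]
    have hiff : (List.take 5 (cs.drop k) = ['&', 'a', 'm', 'p', ';'])
        ↔ (List.isPrefixOf ['a', 'm', 'p', ';'] (cs.drop (k + 1)) = true) := by
      rw [← List.getElem_cons_drop h, hc, List.take_succ_cons]
      rw [List.isPrefixOf_iff_prefix, List.prefix_iff_eq_take]
      simp [eq_comm]
    by_cases hpre : List.isPrefixOf ['a', 'm', 'p', ';'] (cs.drop (k + 1))
    · rw [if_pos (hiff.mpr hpre)]
      simp [hpre]
    · rw [if_neg (fun hx => hpre (hiff.mp hx))]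
      simp [hpre, ampL]
  · have hcont : BADDIES.contains cs[k] = false := by
      simp [BADDIES, PySem.Dict.contains_mk, Ne.symm hc]
    rw [hcont]
    simp [hc]

lemma loopA (cs : List Char) : ∀ (m k : Nat) (acc : List Char), k + m = cs.length →
    (PySem.List.pyRange (k : Int) (cs.length : Int) 1).foldl (kmlcleanStep cs) acc
      = acc ++ fRec (cs.drop k) := by
  intro m
  induction m with
  | zero =>
    intro k acc h
    have hk : k = cs.length := by omega
    subst hk
    rw [show PySem.List.pyRange ((cs.length : Nat) : Int) ((cs.length : Nat) : Int) 1 = []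
          from by simp [PySem.List.pyRange]]
    simp [fRec]
  | succ m ih =>
    intro k acc h
    have hk : (k : Int) < ((cs.length : Nat) : Int) := by exact_mod_cast (by omega : k < cs.length)
    rw [PySem.List.pyRange_one_cons hk, List.foldl_cons]
    rw [show ((k : Int) + 1) = (((k + 1 : Nat)) : Int) from by push_cast; ring]
    rw [ih (k + 1) _ (by omega)]
    rw [step_eq cs acc k (by omega)]
    rw [show fRec (cs.drop k)
          = (if cs[k]'(by omega) == '&' && !(List.isPrefixOf ['a', 'm', 'p', ';'] (cs.drop (k + 1)))
              then ampL else [cs[k]'(by omega)]) ++ fRec (cs.drop (k + 1)) from by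
        rw [← List.getElem_cons_drop (by omega : k < cs.length), fRec]]
    simp [List.append_assoc]

-- ===== VERDICT (by name: the statement is the Claim_ definition above) =====
theorem kmlclean_spec : Claim_equal_kmlclean := by
  intro string _
  unfold Spec_kmlclean kmlclean kmlclean_alt
  match string with
  | none => rfl
  | some s =>
    simp only
    have h1 := loopA s.toList s.toList.length 0 [] (by omega)
    have h2 : ("&amp;".toList : List Char) = ampL := by decide
    have h3 : ("&".toList : List Char) = ['&'] := by decide
    simp only [Nat.cast_zero, List.drop_zero, List.nil_append] at h1
    rw [h1]
    simp only [h2, h3, splitOn_eq, replace_eq, B_eq]
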